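-- pv_equiv track=rewrite | github.com/kevinjohncutler/omnipose | src/omnirefactor/__main__.py | _wants_gui
-- ===== SOURCE A (Python) =====
-- GUI_FLAGS = {
--     "--server",
--     "--host",
--     "--port",
--     "--ssl-cert",
--     "--ssl-key",
--     "--https-dev",
--     "--desktop-host",
--     "--desktop-port",
--     "--desktop-reload",
--     "--no-desktop-reload",
--     "--snapshot",
--     "--snapshot-timeout",
--     "--eval-js",
-- }
--
-- CLI_FLAGS = {"--dir", "--train", "--train_size"}
--
-- def _wants_gui(argv: list[str]) -> bool:
--     if not argv:
--         return True
--     if any(flag in argv for flag in GUI_FLAGS):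
--         return True
--     if any(flag in argv for flag in CLI_FLAGS):
--         return False
--     return True
-- ===== SOURCE B (Python) =====
-- GUI_FLAGS = {
--     "--server",
--     "--host",
--     "--port",
--     "--ssl-cert",
--     "--ssl-key",
--     "--https-dev",
--     "--desktop-host",
--     "--desktop-port",
--     "--desktop-reload",
--     "--no-desktop-reload",
--     "--snapshot",
--     "--snapshot-timeout",
--     "--eval-js",
-- }
--
-- CLI_FLAGS = {"--dir", "--train", "--train_size"}
--
-- # Priority table built once: GUI flags vote 2, CLI flags vote 1, anything else 0.
-- _PRIORITY = {}
-- for _f in GUI_FLAGS: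
--     _PRIORITY[_f] = 2
-- for _f in CLI_FLAGS:
--     _PRIORITY[_f] = 1
--
--
-- def _wants_gui(argv: list[str]) -> bool:
--     # Reduce argv to the maximum priority seen; only a maximum of exactly 1
--     # (a CLI flag present and no GUI flag) suppresses the GUI. Empty argv
--     # needs no special case: the maximum defaults to 0.
--     best = 0
--     for tok in argv:
--         best = max(best, _PRIORITY.get(tok, 0))
--     return best != 1
-- ===== Notes on version B (the rewrite author's own statement) =====
-- stated objective: alternative
-- what changed: Replaces A's emptiness check plus two any()-membership scans with a priority table (GUI=2, CLI=1, other=0) built once and a single max-reduction over argv, returning best != 1; GUI precedence and the empty case fall out of the maximum.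
import Mathlib
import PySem

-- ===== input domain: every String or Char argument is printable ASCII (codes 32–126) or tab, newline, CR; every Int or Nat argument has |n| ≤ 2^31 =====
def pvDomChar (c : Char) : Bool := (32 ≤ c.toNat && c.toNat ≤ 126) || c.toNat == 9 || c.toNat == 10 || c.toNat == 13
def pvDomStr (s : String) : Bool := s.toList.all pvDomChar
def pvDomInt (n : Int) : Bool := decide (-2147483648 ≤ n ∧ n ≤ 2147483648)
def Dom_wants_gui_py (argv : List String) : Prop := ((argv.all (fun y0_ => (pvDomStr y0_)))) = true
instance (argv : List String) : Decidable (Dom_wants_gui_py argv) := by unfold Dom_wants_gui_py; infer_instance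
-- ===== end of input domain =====

-- B replaces A's two any()-scans with a priority table (GUI=2, CLI=1, other=0) and one max-reduction over argv ("alternative" objective).

-- ===== PORT A =====
def guiFlags : List String :=
  ["--server", "--host", "--port", "--ssl-cert", "--ssl-key", "--https-dev",
   "--desktop-host", "--desktop-port", "--desktop-reload", "--no-desktop-reload",
   "--snapshot", "--snapshot-timeout", "--eval-js"]

def cliFlags : List String := ["--dir", "--train", "--train_size"]

-- any(flag in argv for flag in GUI_FLAGS): for each flag, scan argv
def wants_gui_py (argv : List String) : Bool :=
  if argv = [] then true
  else if guiFlags.any (fun flag => argv.contains flag) then true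
  else if cliFlags.any (fun flag => argv.contains flag) then false
  else true

-- ===== PORT B =====
-- _PRIORITY: built once by inserting every GUI flag with 2, then every CLI flag with 1
def prioDict : PySem.Dict String Int :=
  cliFlags.foldl (fun d f => d.insert f 1)
    (guiFlags.foldl (fun d f => d.insert f 2) PySem.Dict.empty)

-- best = max of _PRIORITY.get(tok, 0) over argv, starting at 0; return best != 1
def wants_gui_py_alt (argv : List String) : Bool :=
  let best := argv.foldl (fun b tok => max b (prioDict.getD tok 0)) (0 : Int)
  decide (best ≠ 1)

-- ===== PRECONDITION & SPEC =====
def Spec_wants_gui_py (argv : List String) (out : Bool) : Prop := out = wants_gui_py_alt argv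
instance (argv : List String) (out : Bool) : Decidable (Spec_wants_gui_py argv out) := by unfold Spec_wants_gui_py; infer_instance

-- ===== CLAIM (what is proved, stated in full; the proofs are below) =====
def Claim_equal_wants_gui_py : Prop := ∀ (argv : List String), Dom_wants_gui_py argv → Spec_wants_gui_py argv (wants_gui_py argv)

-- ===== LEMMAS AND PROOFS =====

-- the priority of one token, as a membership conditional
def prioOf (t : String) : Int :=
  if guiFlags.contains t then 2 else if cliFlags.contains t then 1 else 0

-- get? on a block of equal-valued keys is a contains test
theorem get?_mk_map_const (fs : List String) (v : Int) (rest : List (String × Int)) (t : String) :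
    (PySem.Dict.mk ((fs.map (fun f => (f, v))) ++ rest)).get? t
      = if fs.contains t then some v else (PySem.Dict.mk rest).get? t := by
  induction fs with
  | nil => simp
  | cons f fs ih =>
    simp only [List.map_cons, List.cons_append, PySem.Dict.get?_mk_cons, ih,
      List.contains_cons]
    by_cases h : f = t
    · simp [h]
    · have h' : ¬ t = f := fun e => h e.symm
      by_cases h2 : t ∈ fs <;> simp [h, h', h2]

-- the dict lookup computes exactly prioOf (no key occurs in both blocks)
theorem getD_prioDict (t : String) : prioDict.getD t 0 = prioOf t := by
  have hd : prioDict = PySem.Dict.mk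
      ((guiFlags.map (fun f => (f, 2))) ++ ((cliFlags.map (fun f => (f, 1))) ++ [])) := by decide
  rw [hd, PySem.Dict.getD, get?_mk_map_const, get?_mk_map_const cliFlags 1 [] t]
  unfold prioOf
  split_ifs <;> simp_all [Option.getD, PySem.Dict.get?]

-- the value of the whole max-reduction, as the two membership facts
def classify (argv : List String) : Int :=
  if argv.any (fun tok => guiFlags.contains tok) then 2
  else if argv.any (fun tok => cliFlags.contains tok) then 1
  else 0

theorem fold_max (argv : List String) (a : Int) (ha : 0 ≤ a) :
    argv.foldl (fun b tok => max b (prioDict.getD tok 0)) a = max a (classify argv) := by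
  induction argv generalizing a with
  | nil => simp [classify]; omega
  | cons t ts ih =>
    simp only [List.foldl_cons]
    rw [getD_prioDict, ih _ (by unfold prioOf; split_ifs <;> omega)]
    simp only [classify, List.any_cons, prioOf]
    by_cases hg : guiFlags.contains t <;> by_cases hc : cliFlags.contains t <;>
      by_cases hgs : ts.any (fun tok => guiFlags.contains tok) <;>
      by_cases hcs : ts.any (fun tok => cliFlags.contains tok) <;>
      simp_all [Int.max_def] <;> split_ifs <;> omega

-- scanning order swap: "some flag of fs occurs in argv" = "some token of argv is in fs"
theorem any_swap (fs argv : List String) :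
    fs.any (fun flag => argv.contains flag) = argv.any (fun tok => fs.contains tok) := by
  rw [Bool.eq_iff_iff]
  simp only [List.any_eq_true, List.contains_iff_mem]
  exact ⟨fun ⟨a, h1, h2⟩ => ⟨a, h2, h1⟩, fun ⟨a, h1, h2⟩ => ⟨a, h2, h1⟩⟩

-- ===== VERDICT (by name: the statement is the Claim_ definition above) =====
theorem wants_gui_py_spec : Claim_equal_wants_gui_py := by
  intro argv _
  unfold Spec_wants_gui_py wants_gui_py wants_gui_py_alt
  rw [fold_max argv 0 le_rfl, any_swap guiFlags argv, any_swap cliFlags argv]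
  by_cases he : argv = []
  · subst he; rfl
  · by_cases hg : argv.any (fun tok => guiFlags.contains tok) <;>
      by_cases hc : argv.any (fun tok => cliFlags.contains tok) <;>
      simp only [classify, he, hg, hc, if_true, if_false, Bool.false_eq_true] <;> decide
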